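-- pv_equiv track=rewrite | github.com/pypi-data/pypi-mirror-399 | packages/cpp-py-sqm/cpp_py_sqm-0.1.1.tar.gz/cpp_py_sqm-0.1.1/cpp/cstdio.py | _convert_c_format
-- ===== SOURCE A (Python) =====
-- def _convert_c_format(c_format: str) -> str:
--     """转换C格式符为Python格式符"""
--     py_format = []
--     i = 0
--     while i < len(c_format):
--         if c_format[i] == '%':
--             i += 1
--             if i >= len(c_format):
--                 py_format.append('%')
--                 break
--             if c_format[i] in ('d', 'i', 'u'):
--                 py_format.append('%d')
--             elif c_format[i] in ('f', 'lf'):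
--                 py_format.append('%f')
--             elif c_format[i] in ('s', 'c'):
--                 py_format.append(f'%{c_format[i]}')
--             elif c_format[i] == '%':
--                 py_format.append('%%')
--             else:
--                 py_format.append(f'%{c_format[i]}')
--             i += 1
--         else:
--             py_format.append(c_format[i])
--             i += 1
--     return ''.join(py_format)
-- ===== SOURCE B (Python) =====
-- import re
--
-- def _convert_c_format(c_format: str) -> str:
--     """转换C格式符为Python格式符"""
--     def repl(m):
--         ch = m.group(1)
--         if ch in 'diu':
--             return '%d'
--         if ch == 'f':
--             return '%f'
--         return '%' + ch
--     return re.sub(r'%(.)', repl, c_format)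
-- ===== Notes on version B (the rewrite author's own statement) =====
-- stated objective: idiomatic
-- what changed: Replaced the manual index-walking while-loop and list accumulator with a single regex substitution whose callback maps the conversion character; the explicit per-character scanning loop disappears.
import Mathlib
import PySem

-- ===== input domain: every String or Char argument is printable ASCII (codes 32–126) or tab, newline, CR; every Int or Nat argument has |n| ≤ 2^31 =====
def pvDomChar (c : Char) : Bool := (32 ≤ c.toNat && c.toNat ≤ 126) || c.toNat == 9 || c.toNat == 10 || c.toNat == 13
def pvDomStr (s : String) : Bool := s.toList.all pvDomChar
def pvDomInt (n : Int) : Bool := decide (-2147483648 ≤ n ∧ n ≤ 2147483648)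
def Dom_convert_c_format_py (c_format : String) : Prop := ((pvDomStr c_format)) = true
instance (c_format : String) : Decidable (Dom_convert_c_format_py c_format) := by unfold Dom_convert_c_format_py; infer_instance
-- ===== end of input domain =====

-- B replaces A's index-walking while-loop with a single regex substitution (re.sub '%(.)'
-- with a callback); same output on every input, objective: idiomatic.

-- ===== PORT A =====
-- A's while-loop over index i, transcribed as structural recursion on the char list:
-- at '%' it inspects the next char (break case when the string ends) with A's branch order.
def pvAGo : List Char → List Char
  | [] => []
  | '%' :: rest =>
    match rest with
    | [] => ['%']
    | c :: rest' =>
      (if c = 'd' ∨ c = 'i' ∨ c = 'u' then ['%', 'd']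
       else if c = 'f' then ['%', 'f']
       else if c = 's' ∨ c = 'c' then ['%', c]
       else if c = '%' then ['%', '%']
       else ['%', c]) ++ pvAGo rest'
  | c :: rest => c :: pvAGo rest

def convert_c_format_py (c_format : String) : String :=
  String.mk (pvAGo c_format.toList)

-- ===== PORT B =====
-- B's re.sub(r'%(.)', repl): non-overlapping left-to-right matches of '%' followed by any
-- char except '\n' ('.' does not match newline); unmatched chars are copied through.
def pvReplB (c : Char) : List Char :=
  if c = 'd' ∨ c = 'i' ∨ c = 'u' then ['%', 'd']
  else if c = 'f' then ['%', 'f']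
  else ['%', c]

def pvBGo : List Char → List Char
  | [] => []
  | '%' :: c :: rest =>
    if c = '\n' then '%' :: pvBGo (c :: rest)   -- '.' does not match '\n': no match here
    else pvReplB c ++ pvBGo rest
  | c :: rest => c :: pvBGo rest

def convert_c_format_py_alt (c_format : String) : String :=
  String.mk (pvBGo c_format.toList)

-- ===== PRECONDITION & SPEC =====
def Spec_convert_c_format_py (c_format : String) (out : String) : Prop := out = convert_c_format_py_alt c_format
instance (c_format : String) (out : String) : Decidable (Spec_convert_c_format_py c_format out) := by unfold Spec_convert_c_format_py; infer_instance

-- ===== CLAIM (what is proved, stated in full; the proofs are below) =====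
def Claim_equal_convert_c_format_py : Prop := ∀ (c_format : String), Dom_convert_c_format_py c_format → Spec_convert_c_format_py c_format (convert_c_format_py c_format)

-- ===== LEMMAS AND PROOFS =====
theorem pvGo_eq (l : List Char) : pvAGo l = pvBGo l := by
  induction l using pvAGo.induct with
  | case1 => rfl
  | case2 => rfl
  | case3 c rest' ih =>
    simp only [pvAGo, pvBGo, pvReplB]
    by_cases h : c = '\n'
    · subst h; simp [pvBGo, ih]
    · split_ifs with h1 h2 h3 h4 <;> simp_all [pvBGo]
  | case4 c rest h ih =>
    rw [pvAGo, pvBGo]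
    · rw [ih]
    · intro c' rest' hc; cases hc; exact absurd rfl h
    · exact fun h' => absurd h' (by intro h''; exact h (by rw [h'']))

-- ===== VERDICT (by name: the statement is the Claim_ definition above) =====
theorem convert_c_format_py_spec : Claim_equal_convert_c_format_py := by
  intro s _
  unfold Spec_convert_c_format_py convert_c_format_py convert_c_format_py_alt
  rw [pvGo_eq]
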